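-- pv_equiv track=rewrite | github.com/mjtomei/human | cognitive_gen/graph_search/cluster_analysis.py | find_bridge_essays
-- ===== SOURCE A (Python) =====
-- def find_bridge_essays(overlaps: dict, target_loc: str, top_n: int = 5) -> list:
--     """Find essays that share the most values with a target essay."""
--     bridges = []
--     for (loc1, loc2), count in overlaps.items():
--         if loc1 == target_loc:
--             bridges.append((loc2, count))
--         elif loc2 == target_loc:
--             bridges.append((loc1, count))
--
--     return sorted(bridges, key=lambda x: -x[1])[:top_n]
-- ===== SOURCE B (Python) =====
-- def find_bridge_essays(overlaps: dict, target_loc: str, top_n: int = 5) -> list: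
--     """Single pass: keep a bounded buffer of the best (loc, count) pairs, ordered by
--     descending count (ties in first-seen order), instead of collecting everything and
--     fully sorting."""
--     best = []
--     for (loc1, loc2), count in overlaps.items():
--         if loc1 == target_loc:
--             other = loc2
--         elif loc2 == target_loc:
--             other = loc1
--         else:
--             continue
--         i = 0
--         while i < len(best) and best[i][1] >= count:
--             i += 1
--         best.insert(i, (other, count))
--         if len(best) > top_n:
--             best.pop()
--     return best
-- ===== Notes on version B (the rewrite author's own statement) =====
-- stated objective: alternative
-- what changed: A collects all matching (loc, count) pairs, fully sorts them by descending count and slices the first top_n; B makes a single pass that maintains a bounded insertion buffer of at most top_n pairs (descending by count, ties first-seen), never building or sorting the full list.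
-- outside the precondition, e.g. on find_bridge_essays({('a', 'b'): 3, ('a', 'c'): 1}, 'a', -1): A returns [('b', 3)], B returns []
import Mathlib
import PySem

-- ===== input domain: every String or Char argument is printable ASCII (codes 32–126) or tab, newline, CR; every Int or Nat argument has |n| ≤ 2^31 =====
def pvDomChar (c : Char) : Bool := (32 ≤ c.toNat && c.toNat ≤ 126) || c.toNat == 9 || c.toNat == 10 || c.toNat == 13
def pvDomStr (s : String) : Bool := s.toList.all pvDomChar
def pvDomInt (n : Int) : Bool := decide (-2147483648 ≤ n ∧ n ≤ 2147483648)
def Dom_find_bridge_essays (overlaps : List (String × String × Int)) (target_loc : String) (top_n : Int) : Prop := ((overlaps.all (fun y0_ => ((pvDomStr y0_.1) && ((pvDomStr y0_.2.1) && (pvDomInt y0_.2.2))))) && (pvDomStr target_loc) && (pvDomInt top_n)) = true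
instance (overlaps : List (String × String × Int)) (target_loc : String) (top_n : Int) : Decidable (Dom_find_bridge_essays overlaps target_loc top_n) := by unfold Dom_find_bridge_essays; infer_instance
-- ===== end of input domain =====

-- B replaces A's full sort + slice by a single pass that maintains a bounded buffer
-- of the top matches (descending by count, ties in first-seen order): alternative algorithm.


-- ===== PORT A =====
-- the Python callers pass `overlaps` as a dict keyed by (loc1, loc2); the association
-- list becomes that dict (overwrite keeps position, new keys append) — shared by both ports
def pvBuildDict (overlaps : List (String × String × Int)) : PySem.Dict (String × String) Int :=
  overlaps.foldl (fun d t => PySem.Dict.insert d (t.1, t.2.1) t.2.2) PySem.Dict.empty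

def find_bridge_essays (overlaps : List (String × String × Int)) (target_loc : String) (top_n : Int) : List (String × Int) :=
  let bridges := (pvBuildDict overlaps).items.foldl
    (fun acc it =>
      if it.1.1 = target_loc then acc ++ [(it.1.2, it.2)]
      else if it.1.2 = target_loc then acc ++ [(it.1.1, it.2)]
      else acc) []
  PySem.List.slice (PySem.List.sorted bridges (fun x => -x.2)) none (some top_n)

-- ===== PORT B =====
-- `best.insert(i, x)` after the left-to-right while scan: insert before the first
-- element with a strictly smaller count
def pvBIns (x : String × Int) : List (String × Int) → List (String × Int)
  | [] => [x]
  | y :: ys => if y.2 ≥ x.2 then y :: pvBIns x ys else x :: y :: ys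

def pvBStep (top_n : Int) (best : List (String × Int)) (x : String × Int) : List (String × Int) :=
  let b := pvBIns x best
  if top_n < (b.length : Int) then b.dropLast else b  -- best.pop(): b is nonempty whenever this fires

def find_bridge_essays_alt (overlaps : List (String × String × Int)) (target_loc : String) (top_n : Int) : List (String × Int) :=
  (pvBuildDict overlaps).items.foldl
    (fun best it =>
      if it.1.1 = target_loc then pvBStep top_n best (it.1.2, it.2)
      else if it.1.2 = target_loc then pvBStep top_n best (it.1.1, it.2)
      else best) []

-- ===== PRECONDITION & SPEC =====
-- Pre_ restricts top_n, a result-count, to its natural domain top_n ≥ 0; for negative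
-- top_n A's Python slice counts from the end while B's bounded buffer keeps nothing,
-- a corner no caller of a top-N selection specifies.
def Pre_find_bridge_essays (overlaps : List (String × String × Int)) (target_loc : String) (top_n : Int) : Prop := 0 ≤ top_n
instance (overlaps : List (String × String × Int)) (target_loc : String) (top_n : Int) : Decidable (Pre_find_bridge_essays overlaps target_loc top_n) := by unfold Pre_find_bridge_essays; infer_instance
def pvWitness_find_bridge_essays : (List (String × String × Int)) × String × Int := ([("a", "b", 3), ("a", "c", 1)], "a", 1)

def Spec_find_bridge_essays (overlaps : List (String × String × Int)) (target_loc : String) (top_n : Int) (out : List (String × Int)) : Prop := out = find_bridge_essays_alt overlaps target_loc top_n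
instance (overlaps : List (String × String × Int)) (target_loc : String) (top_n : Int) (out : List (String × Int)) : Decidable (Spec_find_bridge_essays overlaps target_loc top_n out) := by unfold Spec_find_bridge_essays; infer_instance

-- ===== CLAIM (what is proved, stated in full; the proofs are below) =====
def Claim_equal_find_bridge_essays : Prop := ∀ (overlaps : List (String × String × Int)) (target_loc : String) (top_n : Int), Dom_find_bridge_essays overlaps target_loc top_n → Pre_find_bridge_essays overlaps target_loc top_n → Spec_find_bridge_essays overlaps target_loc top_n (find_bridge_essays overlaps target_loc top_n)

-- ===== LEMMAS AND PROOFS =====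

-- the insertion order both programs realise: before the first strictly smaller count
def pvP (a b : String × Int) : Bool := decide (b.2 < a.2)

theorem pvBIns_eq_insertBy (x : String × Int) (s : List (String × Int)) :
    pvBIns x s = PySem.List.insertBy pvP x s := by
  induction s with
  | nil => rfl
  | cons y ys ih =>
    by_cases h : y.2 < x.2
    · simp [pvBIns, PySem.List.insertBy, pvP, h, not_le.mpr h]
    · simp [pvBIns, PySem.List.insertBy, pvP, h, not_lt.mp h, ih]

theorem pvLength_insertBy (x : String × Int) (s : List (String × Int)) :
    (PySem.List.insertBy pvP x s).length = s.length + 1 := by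
  induction s with
  | nil => rfl
  | cons y ys ih =>
    simp only [PySem.List.insertBy]
    split_ifs <;> simp [ih]

-- truncation to the first n commutes with ordered insertion
theorem pvCore (R : List (String × Int)) (x : String × Int) (n : Nat) :
    (if n < (PySem.List.insertBy pvP x (R.take n)).length
       then (PySem.List.insertBy pvP x (R.take n)).dropLast
       else PySem.List.insertBy pvP x (R.take n))
    = (PySem.List.insertBy pvP x R).take n := by
  induction R generalizing n with
  | nil =>
    cases n with
    | zero => simp [PySem.List.insertBy]
    | succ m => simp [PySem.List.insertBy]
  | cons y R' ih =>
    cases n with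
    | zero => simp [PySem.List.insertBy]
    | succ m =>
      rw [List.take_succ_cons]
      by_cases hp : pvP x y = true
      · rw [show PySem.List.insertBy pvP x (y :: R'.take m) = x :: y :: R'.take m from by
              simp [PySem.List.insertBy, hp],
            show PySem.List.insertBy pvP x (y :: R') = x :: y :: R' from by
              simp [PySem.List.insertBy, hp]]
        by_cases hm : m ≤ R'.length
        · have hlen : (R'.take m).length = m := by simp [hm]
          rw [if_pos (by simp [hlen])]
          cases m with
          | zero => simp
          | succ k =>
            have hR0 : R' ≠ [] := by
              intro h; rw [h] at hm; simp at hm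
            have ht : R'.take (k + 1) ≠ [] := by
              simp [List.take_eq_nil_iff, hR0]
            rw [List.dropLast_cons_of_ne_nil (by simp),
                List.dropLast_cons_of_ne_nil ht,
                List.take_succ_cons, List.take_succ_cons]
            congr 1
            congr 1
            rw [List.dropLast_eq_take, hlen, List.take_take]
            congr 1
            omega
        · obtain ⟨k, rfl⟩ : ∃ k, m = k + 1 := ⟨m - 1, by omega⟩
          have hR : R'.take (k + 1) = R' := List.take_of_length_le (by omega)
          rw [hR, if_neg (by simp; omega), List.take_succ_cons, List.take_succ_cons,
              List.take_of_length_le (by omega)]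
      · have hp1 : PySem.List.insertBy pvP x (y :: R'.take m)
            = y :: PySem.List.insertBy pvP x (R'.take m) := by
          simp [PySem.List.insertBy, hp]
        have hp2 : PySem.List.insertBy pvP x (y :: R')
            = y :: PySem.List.insertBy pvP x R' := by
          simp [PySem.List.insertBy, hp]
        have hl : (PySem.List.insertBy pvP x (R'.take m)).length = (R'.take m).length + 1 :=
          pvLength_insertBy _ _
        rw [hp1, hp2, List.take_succ_cons, ← ih m]
        by_cases hc : m < (PySem.List.insertBy pvP x (R'.take m)).length
        · rw [if_pos (by simp; omega), if_pos hc,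
              List.dropLast_cons_of_ne_nil (by intro h; rw [h] at hl; simp at hl)]
        · rw [if_neg (by simp; omega), if_neg hc]

-- B's fold over the items equals the bounded-insert fold over the matching pairs only
theorem pvB_fold_flat (t : String) (n : Int) (L : List ((String × String) × Int))
    (init : List (String × Int)) :
    L.foldl (fun best it =>
      if it.1.1 = t then pvBStep n best (it.1.2, it.2)
      else if it.1.2 = t then pvBStep n best (it.1.1, it.2)
      else best) init
    = (L.flatMap (fun it =>
        if it.1.1 = t then [(it.1.2, it.2)]
        else if it.1.2 = t then [(it.1.1, it.2)]
        else [])).foldl (pvBStep n) init := by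
  induction L generalizing init with
  | nil => rfl
  | cons it L ih =>
    simp only [List.foldl_cons, List.flatMap_cons]
    split_ifs <;> simp [ih]

-- the bounded-insert fold IS "take n" of the full insertion sort
theorem pvB_fold_take (n : Int) (hn : 0 ≤ n) (M : List (String × Int)) :
    M.foldl (pvBStep n) []
    = (M.foldl (fun acc x => PySem.List.insertBy pvP x acc) []).take n.toNat := by
  induction M using List.reverseRecOn with
  | nil => simp
  | append_singleton M x ih =>
    rw [List.foldl_append, List.foldl_append]
    simp only [List.foldl_cons, List.foldl_nil]
    rw [ih]
    unfold pvBStep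
    simp only [pvBIns_eq_insertBy]
    set R := M.foldl (fun acc x => PySem.List.insertBy pvP x acc) [] with hR
    have := pvCore R x n.toNat
    rw [← this]
    have hcast : (n < ((PySem.List.insertBy pvP x (R.take n.toNat)).length : Int)) ↔
        (n.toNat < (PySem.List.insertBy pvP x (R.take n.toNat)).length) := by omega
    split_ifs with h1 h2 h2 <;> first | rfl | (exact absurd (hcast.mp h1) h2) | (exact absurd (hcast.mpr h2) h1)

theorem pvMain (t : String) (n : Int) (hn : 0 ≤ n) (L : List ((String × String) × Int)) :
    L.foldl (fun best it =>
      if it.1.1 = t then pvBStep n best (it.1.2, it.2)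
      else if it.1.2 = t then pvBStep n best (it.1.1, it.2)
      else best) []
    = PySem.List.slice
        (PySem.List.sorted
          (L.foldl (fun acc it =>
            if it.1.1 = t then acc ++ [(it.1.2, it.2)]
            else if it.1.2 = t then acc ++ [(it.1.1, it.2)]
            else acc) [])
          (fun x => -x.2))
        none (some n) := by
  rw [PySem.List.slice_to _ hn]
  rw [PySem.List.sorted_eq_foldl_insertBy]
  have hpred : (fun acc (x : String × Int) =>
      PySem.List.insertBy (fun a b => decide ((fun x : String × Int => -x.2) a < (fun x : String × Int => -x.2) b)) x acc)
      = fun acc x => PySem.List.insertBy pvP x acc := by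
    funext acc x
    congr 1
    funext a b
    simp [pvP, neg_lt_neg_iff]
  rw [hpred]
  -- turn A's appending fold into a flatMap
  have hA : (L.foldl (fun acc it =>
        if it.1.1 = t then acc ++ [(it.1.2, it.2)]
        else if it.1.2 = t then acc ++ [(it.1.1, it.2)]
        else acc) [])
      = L.flatMap (fun it =>
        if it.1.1 = t then [(it.1.2, it.2)]
        else if it.1.2 = t then [(it.1.1, it.2)]
        else []) := by
    have : (fun acc (it : (String × String) × Int) =>
        if it.1.1 = t then acc ++ [(it.1.2, it.2)]
        else if it.1.2 = t then acc ++ [(it.1.1, it.2)]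
        else acc)
      = fun acc it => acc ++ (if it.1.1 = t then [(it.1.2, it.2)]
        else if it.1.2 = t then [(it.1.1, it.2)] else []) := by
      funext acc it; split_ifs <;> simp
    rw [this, PySem.List.foldl_append_eq_flatMap]
    rfl
  rw [hA, pvB_fold_flat, pvB_fold_take n hn]

-- ===== VERDICT (by name: the statement is the Claim_ definition above) =====
theorem find_bridge_essays_spec : Claim_equal_find_bridge_essays := by
  intro overlaps target_loc top_n _ hpre
  unfold Spec_find_bridge_essays find_bridge_essays find_bridge_essays_alt
  exact (pvMain target_loc top_n hpre (pvBuildDict overlaps).items).symm
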